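-- pv_equiv track=rewrite | github.com/Wesley-CR/Proyecto_1_Intro | proyectoMemoCon1For.py | numeroInvalido
-- ===== SOURCE A (Python) =====
-- def numeroInvalido(repeticiones: int, numeros: list[int], divisor: list[int] = []) -> bool:
--     numerosRepetidos = {}
--     for i in numeros:
--         if i in numerosRepetidos:
--             numerosRepetidos[i] += 1
--         else:
--             numerosRepetidos[i] = 1
--         if numerosRepetidos[i] > repeticiones:
--             return True
--     if divisor:
--         for i in divisor:
--             if i in numerosRepetidos:
--                 numerosRepetidos[i] += 1
--             else:
--                 numerosRepetidos[i] = 1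
--             if numerosRepetidos[i] > repeticiones:
--                 return True
--     return False
-- ===== SOURCE B (Python) =====
-- def numeroInvalido(repeticiones: int, numeros: list[int], divisor: list[int] = []) -> bool:
--     # Sort everything; a value occurs more than `repeticiones` times exactly when the
--     # sorted list has two equal elements `repeticiones` positions apart (no dict at all).
--     s = sorted(numeros + divisor)
--     r = max(repeticiones, 0)
--     return any(s[i] == s[i + r] for i in range(len(s) - r))
-- ===== Notes on version B (the rewrite author's own statement) =====
-- stated objective: alternative
-- what changed: Replaces A's dict-based count-with-early-return loops by a sort-based algorithm with no counting at all: sort numeros+divisor and check whether any two elements max(repeticiones,0) positions apart are equal, which happens iff some value's multiplicity exceeds the limit.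
import Mathlib
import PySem

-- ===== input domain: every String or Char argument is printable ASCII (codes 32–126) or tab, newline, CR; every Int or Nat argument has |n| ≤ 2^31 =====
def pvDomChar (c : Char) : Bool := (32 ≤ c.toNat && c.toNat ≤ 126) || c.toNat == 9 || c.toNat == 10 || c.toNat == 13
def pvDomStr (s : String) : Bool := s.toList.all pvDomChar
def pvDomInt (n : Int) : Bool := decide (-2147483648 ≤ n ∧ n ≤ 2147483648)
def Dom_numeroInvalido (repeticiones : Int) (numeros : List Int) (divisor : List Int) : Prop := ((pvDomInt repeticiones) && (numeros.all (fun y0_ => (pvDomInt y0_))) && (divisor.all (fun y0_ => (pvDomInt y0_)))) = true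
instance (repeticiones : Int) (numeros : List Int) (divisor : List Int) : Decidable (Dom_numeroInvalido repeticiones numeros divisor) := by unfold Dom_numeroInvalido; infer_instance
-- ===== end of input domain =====

-- B replaces A's dict-based count-with-early-return loops by sorting numeros+divisor and
-- looking for two equal elements max(repeticiones,0) positions apart; objective: alternative.

-- ===== PORT A =====
-- A's for-loop body (shared verbatim by both of A's loops): count the element, and
-- return True early (encoded as `none`) as soon as its running count exceeds the limit;
-- `some d` means the loop finished normally with dict d.
def pvLoopA (repeticiones : Int) : List Int → PySem.Dict Int Int → Option (PySem.Dict Int Int)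
  | [], d => some d
  | i :: rest, d =>
    let d' := if d.contains i then d.insert i (d.getD i 0 + 1) else d.insert i 1
    if d'.getD i 0 > repeticiones then none else pvLoopA repeticiones rest d'

def numeroInvalido (repeticiones : Int) (numeros : List Int) (divisor : List Int) : Bool :=
  match pvLoopA repeticiones numeros PySem.Dict.empty with
  | none => true
  | some d =>
    if divisor ≠ [] then
      match pvLoopA repeticiones divisor d with
      | none => true
      | some _ => false
    else false

-- ===== PORT B =====
-- Source B: s = sorted(numeros + divisor); r = max(repeticiones, 0);
--       return any(s[i] == s[i + r] for i in range(len(s) - r))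
def numeroInvalido_alt (repeticiones : Int) (numeros : List Int) (divisor : List Int) : Bool :=
  let s := PySem.List.sorted (numeros ++ divisor) (fun x => x)
  let r := max repeticiones 0
  (PySem.List.pyRange 0 ((s.length : Int) - r)).any
    (fun i => PySem.List.pyGet? s i == PySem.List.pyGet? s (i + r))

-- ===== PRECONDITION & SPEC =====
def Spec_numeroInvalido (repeticiones : Int) (numeros : List Int) (divisor : List Int) (out : Bool) : Prop := out = numeroInvalido_alt repeticiones numeros divisor
instance (repeticiones : Int) (numeros : List Int) (divisor : List Int) (out : Bool) : Decidable (Spec_numeroInvalido repeticiones numeros divisor out) := by unfold Spec_numeroInvalido; infer_instance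

-- ===== CLAIM (what is proved, stated in full; the proofs are below) =====
def Claim_equal_numeroInvalido : Prop := ∀ (repeticiones : Int) (numeros : List Int) (divisor : List Int), Dom_numeroInvalido repeticiones numeros divisor → Spec_numeroInvalido repeticiones numeros divisor (numeroInvalido repeticiones numeros divisor)

-- ===== LEMMAS AND PROOFS =====

-- A's loop composes over append: run the first list, then (unless it returned early) the second.
theorem pvLoopA_append (rep : Int) (l1 l2 : List Int) (d : PySem.Dict Int Int) :
    pvLoopA rep (l1 ++ l2) d =
      match pvLoopA rep l1 d with
      | none => none
      | some d' => pvLoopA rep l2 d' := by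
  induction l1 generalizing d with
  | nil => simp [pvLoopA]
  | cons i rest ih =>
    simp only [List.cons_append, pvLoopA]
    split <;> split <;> first | rfl | exact ih _

-- The two branches of A's body both store getD+1 (in the absent case getD is 0).
theorem pvLoopA_cons (rep : Int) (i : Int) (rest : List Int) (d : PySem.Dict Int Int) :
    pvLoopA rep (i :: rest) d =
      (if d.getD i 0 + 1 > rep then none
       else pvLoopA rep rest (d.insert i (d.getD i 0 + 1))) := by
  simp only [pvLoopA]
  by_cases h : d.contains i = true
  · simp [h, PySem.Dict.getD_insert_self]
  · have h0 : d.getD i 0 = 0 :=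
      PySem.Dict.getD_of_not_contains d 0 (by simpa using h)
    simp [h, h0, PySem.Dict.getD_insert_self]

-- Early-exit characterisation: as long as every stored count is between 0 and the limit
-- (with 0 allowed even for a negative limit), the loop returns early iff some element's
-- final total count exceeds the limit.
theorem pvLoopA_none_iff (rep : Int) (l : List Int) (d : PySem.Dict Int Int)
    (hinv : ∀ k, 0 ≤ d.getD k 0 ∧ d.getD k 0 ≤ max rep 0) :
    pvLoopA rep l d = none ↔ ∃ i ∈ l, rep < d.getD i 0 + (l.count i : Int) := by
  induction l generalizing d with
  | nil => simp [pvLoopA]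
  | cons i rest ih =>
    rw [pvLoopA_cons]
    by_cases hgt : d.getD i 0 + 1 > rep
    · rw [if_pos hgt]
      have hx : ∃ j ∈ i :: rest, rep < d.getD j 0 + ((i :: rest).count j : Int) := by
        refine ⟨i, by simp, ?_⟩
        have hc : (i :: rest).count i = rest.count i + 1 := by simp
        rw [hc]
        have := (hinv i).1
        push_cast
        omega
      exact iff_of_true rfl hx
    · rw [if_neg hgt]
      have hinv' : ∀ k, 0 ≤ (d.insert i (d.getD i 0 + 1)).getD k 0 ∧
          (d.insert i (d.getD i 0 + 1)).getD k 0 ≤ max rep 0 := by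
        intro k
        rw [PySem.Dict.getD_insert]
        split
        · have := (hinv i).1; omega
        · exact hinv k
      rw [ih _ hinv']
      constructor
      · rintro ⟨j, hj, hval⟩
        by_cases hji : j = i
        · subst hji
          refine ⟨j, by simp, ?_⟩
          rw [PySem.Dict.getD_insert_self] at hval
          have hc : (j :: rest).count j = rest.count j + 1 := by simp
          rw [hc]; push_cast at hval ⊢; omega
        · refine ⟨j, by simp [hj], ?_⟩
          rw [PySem.Dict.getD_insert, if_neg hji] at hval
          have hc : (i :: rest).count j = rest.count j := by
            simp [Ne.symm hji]
          rw [hc]; exact hval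
      · rintro ⟨j, hj, hval⟩
        by_cases hji : j = i
        · subst hji
          have hc : (j :: rest).count j = rest.count j + 1 := by simp
          rw [hc] at hval
          push_cast at hval
          have hmem : j ∈ rest := by
            by_contra hnm
            have h0 : rest.count j = 0 := List.count_eq_zero.mpr hnm
            omega
          refine ⟨j, hmem, ?_⟩
          rw [PySem.Dict.getD_insert_self]
          omega
        · rcases List.mem_cons.mp hj with h | h
          · exact absurd h hji
          · refine ⟨j, h, ?_⟩
            rw [PySem.Dict.getD_insert, if_neg hji]
            have hc : (i :: rest).count j = rest.count j := by
              simp [Ne.symm hji]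
            rw [hc] at hval
            exact hval

-- A returns true iff some element's total count over numeros ++ divisor exceeds the limit.
theorem numeroInvalido_eq_true_iff (rep : Int) (numeros divisor : List Int) :
    numeroInvalido rep numeros divisor = true ↔
      ∃ i ∈ numeros ++ divisor, rep < ((numeros ++ divisor).count i : Int) := by
  have hinv : ∀ k, 0 ≤ (PySem.Dict.empty : PySem.Dict Int Int).getD k 0 ∧
      (PySem.Dict.empty : PySem.Dict Int Int).getD k 0 ≤ max rep 0 := by
    intro k; rw [PySem.Dict.getD_empty]; exact ⟨le_refl 0, le_max_right _ _⟩
  have hmain := pvLoopA_none_iff rep (numeros ++ divisor) PySem.Dict.empty hinv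
  simp only [PySem.Dict.getD_empty, zero_add] at hmain
  rw [← hmain, pvLoopA_append]
  unfold numeroInvalido
  rcases h1 : pvLoopA rep numeros PySem.Dict.empty with _ | d
  · simp
  · by_cases hd : divisor = []
    · subst hd; simp [pvLoopA]
    · simp only [if_pos (by simpa using hd)]
      rcases h2 : pvLoopA rep divisor d with _ | d2 <;> simp

-- B returns true iff the sorted list has two equal entries r = max(rep,0) positions apart.
theorem numeroInvalido_alt_true_iff (rep : Int) (numeros divisor : List Int) :
    numeroInvalido_alt rep numeros divisor = true ↔
      ∃ j : ℕ, j + (max rep 0).toNat < (PySem.List.sorted (numeros ++ divisor) (fun x => x)).length ∧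
        (PySem.List.sorted (numeros ++ divisor) (fun x => x))[j]? =
          (PySem.List.sorted (numeros ++ divisor) (fun x => x))[j + (max rep 0).toNat]? := by
  unfold numeroInvalido_alt
  simp only [List.any_eq_true, PySem.List.mem_pyRange_one, beq_iff_eq]
  constructor
  · rintro ⟨i, ⟨h0, hlt⟩, heq⟩
    refine ⟨i.toNat, ?_, ?_⟩
    · omega
    · rw [PySem.List.pyGet?_of_nonneg _ h0,
        PySem.List.pyGet?_of_nonneg _ (by positivity : (0:Int) ≤ i + max rep 0)] at heq
      have : (i + max rep 0).toNat = i.toNat + (max rep 0).toNat := by omega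
      rw [this] at heq
      exact heq
  · rintro ⟨j, hj, heq⟩
    refine ⟨(j : Int), ⟨by positivity, by omega⟩, ?_⟩
    rw [PySem.List.pyGet?_of_nonneg _ (by positivity : (0:Int) ≤ (j:Int)),
      PySem.List.pyGet?_of_nonneg _ (by positivity : (0:Int) ≤ (j:Int) + max rep 0)]
    have : ((j : Int) + max rep 0).toNat = j + (max rep 0).toNat := by omega
    rw [this, Int.toNat_natCast]
    exact heq

-- If the sorted list has two equal entries r apart, that value occurs at least r+1 times:
-- by monotonicity the whole window between them is constant.
theorem count_of_window (L : List Int) (r j : ℕ)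
    (hj : j + r < (PySem.List.sorted L (fun x => x)).length)
    (heq : (PySem.List.sorted L (fun x => x))[j]? =
      (PySem.List.sorted L (fun x => x))[j + r]?) :
    ∃ v ∈ L, r + 1 ≤ L.count v := by
  have hLl : (PySem.List.sorted L (fun x => x)).length = L.length :=
    PySem.List.length_sorted L (fun x => x) false
  have hjl : j < (PySem.List.sorted L (fun x => x)).length := by omega
  rw [List.getElem?_eq_getElem hjl, List.getElem?_eq_getElem hj] at heq
  have heq' := Option.some.inj heq
  refine ⟨(PySem.List.sorted L (fun x => x))[j], ?_, ?_⟩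
  · exact (PySem.List.mem_sorted L (fun x => x) false _).mp (List.getElem_mem hjl)
  · have hall : ∀ b ∈ ((PySem.List.sorted L (fun x => x)).drop j).take (r + 1),
        (PySem.List.sorted L (fun x => x))[j] = b := by
      intro b hb
      obtain ⟨m, hm, rfl⟩ := List.mem_iff_getElem.mp hb
      have hmr : m ≤ r := by
        have := hm; simp [List.length_take, List.length_drop] at this; omega
      rw [List.getElem_take, List.getElem_drop]
      have h1 : (PySem.List.sorted L (fun x => x))[j] ≤
          (PySem.List.sorted L (fun x => x))[j + m] :=
        PySem.List.sorted_id_getElem_mono L (by omega) (by omega)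
      have h2 : (PySem.List.sorted L (fun x => x))[j + m] ≤
          (PySem.List.sorted L (fun x => x))[j + r] :=
        PySem.List.sorted_id_getElem_mono L (by omega) hj
      rw [← heq'] at h2
      exact le_antisymm h1 h2
    have hcnt : (((PySem.List.sorted L (fun x => x)).drop j).take (r + 1)).count
        (PySem.List.sorted L (fun x => x))[j] =
        (((PySem.List.sorted L (fun x => x)).drop j).take (r + 1)).length :=
      List.count_eq_length.mpr hall
    have hlen : (((PySem.List.sorted L (fun x => x)).drop j).take (r + 1)).length = r + 1 := by
      simp [List.length_take, List.length_drop]; omega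
    have hsub : (((PySem.List.sorted L (fun x => x)).drop j).take (r + 1)).Sublist
        (PySem.List.sorted L (fun x => x)) :=
      (List.take_sublist _ _).trans (List.drop_sublist _ _)
    have hle := hsub.count_le (PySem.List.sorted L (fun x => x))[j]
    rw [hcnt, hlen] at hle
    rw [← (PySem.List.sorted_perm L (fun x => x) false).count_eq]
    exact hle

-- Conversely: if some value occurs at least r+1 times, its first occurrence i0 in the
-- sorted list satisfies s[i0] = s[i0+r] (otherwise all its occurrences would fit in a
-- window of r positions).
theorem window_of_count (L : List Int) (r : ℕ) (v : Int) (hv : v ∈ L)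
    (hc : r + 1 ≤ L.count v) :
    ∃ j : ℕ, j + r < (PySem.List.sorted L (fun x => x)).length ∧
      (PySem.List.sorted L (fun x => x))[j]? =
        (PySem.List.sorted L (fun x => x))[j + r]? := by
  have hLl : (PySem.List.sorted L (fun x => x)).length = L.length :=
    PySem.List.length_sorted L (fun x => x) false
  have hvs : v ∈ PySem.List.sorted L (fun x => x) :=
    (PySem.List.mem_sorted L (fun x => x) false v).mpr hv
  have hcs : r + 1 ≤ (PySem.List.sorted L (fun x => x)).count v := by
    rw [(PySem.List.sorted_perm L (fun x => x) false).count_eq]; exact hc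
  have hi0 : (PySem.List.sorted L (fun x => x)).idxOf v <
      (PySem.List.sorted L (fun x => x)).length := List.idxOf_lt_length_of_mem hvs
  have hgi0 : (PySem.List.sorted L (fun x => x))[(PySem.List.sorted L (fun x => x)).idxOf v] = v :=
    List.getElem_idxOf hi0
  -- no occurrence of v strictly before its first occurrence
  have htake : ((PySem.List.sorted L (fun x => x)).take
      ((PySem.List.sorted L (fun x => x)).idxOf v)).count v = 0 := by
    rw [List.count_eq_zero]
    intro hmem
    obtain ⟨m, hm, hval⟩ := List.mem_iff_getElem.mp hmem
    have hmlt : m < (PySem.List.sorted L (fun x => x)).idxOf v := by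
      simp [List.length_take] at hm; omega
    have hne := List.not_of_lt_findIdx
      (show m < List.findIdx (fun y => y == v) (PySem.List.sorted L (fun x => x)) from hmlt)
    rw [List.getElem_take] at hval
    simp at hne
    exact hne hval
  -- split s as take i0 ++ take r (drop i0) ++ drop (i0 + r)
  have hsplit : (PySem.List.sorted L (fun x => x)).count v =
      ((PySem.List.sorted L (fun x => x)).take
        ((PySem.List.sorted L (fun x => x)).idxOf v)).count v +
      ((((PySem.List.sorted L (fun x => x)).drop
        ((PySem.List.sorted L (fun x => x)).idxOf v)).take r).count v +
      (((PySem.List.sorted L (fun x => x)).drop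
        ((PySem.List.sorted L (fun x => x)).idxOf v)).drop r).count v) := by
    conv_lhs => rw [← List.take_append_drop ((PySem.List.sorted L (fun x => x)).idxOf v)
      (PySem.List.sorted L (fun x => x))]
    rw [List.count_append]
    congr 1
    conv_lhs => rw [← List.take_append_drop r ((PySem.List.sorted L (fun x => x)).drop
      ((PySem.List.sorted L (fun x => x)).idxOf v))]
    rw [List.count_append]
  have hmid : (((PySem.List.sorted L (fun x => x)).drop
      ((PySem.List.sorted L (fun x => x)).idxOf v)).take r).count v ≤ r :=
    le_trans List.count_le_length (by simp [List.length_take])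
  -- the first occurrence plus r must still be inside the list
  have hlen : (PySem.List.sorted L (fun x => x)).idxOf v + r <
      (PySem.List.sorted L (fun x => x)).length := by
    by_contra hge
    have hdrop : (((PySem.List.sorted L (fun x => x)).drop
        ((PySem.List.sorted L (fun x => x)).idxOf v)).drop r) = [] := by
      rw [List.drop_drop, List.drop_eq_nil_iff]
      omega
    rw [htake, hdrop] at hsplit
    simp only [List.count_nil, Nat.zero_add, Nat.add_zero] at hsplit
    omega
  refine ⟨(PySem.List.sorted L (fun x => x)).idxOf v, hlen, ?_⟩
  -- and the entry r after the first occurrence still equals v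
  have hle : v ≤ (PySem.List.sorted L (fun x => x))[(PySem.List.sorted L (fun x => x)).idxOf v + r] := by
    conv_lhs => rw [← hgi0]
    exact PySem.List.sorted_id_getElem_mono L (by omega) hlen
  have heq : (PySem.List.sorted L (fun x => x))[(PySem.List.sorted L (fun x => x)).idxOf v + r] = v := by
    by_contra hne
    have hlt : v < (PySem.List.sorted L (fun x => x))[(PySem.List.sorted L (fun x => x)).idxOf v + r] :=
      lt_of_le_of_ne hle (fun h => hne h.symm)
    have hdrop : (((PySem.List.sorted L (fun x => x)).drop
        ((PySem.List.sorted L (fun x => x)).idxOf v)).drop r).count v = 0 := by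
      rw [List.drop_drop, List.count_eq_zero]
      intro hmem
      obtain ⟨m, hm, hval⟩ := List.mem_iff_getElem.mp hmem
      rw [List.length_drop] at hm
      have hmlen : (PySem.List.sorted L (fun x => x)).idxOf v + r + m <
          (PySem.List.sorted L (fun x => x)).length := by omega
      have hmono := PySem.List.sorted_id_getElem_mono L
        (p := (PySem.List.sorted L (fun x => x)).idxOf v + r)
        (q := (PySem.List.sorted L (fun x => x)).idxOf v + r + m) (by omega) hmlen
      rw [List.getElem_drop] at hval
      rw [hval] at hmono
      omega
    rw [htake, hdrop] at hsplit
    omega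
  rw [List.getElem?_eq_getElem hi0, List.getElem?_eq_getElem hlen, hgi0, heq]

-- ===== VERDICT (by name: the statement is the Claim_ definition above) =====
theorem numeroInvalido_spec : Claim_equal_numeroInvalido := by
  intro rep numeros divisor _
  unfold Spec_numeroInvalido
  rw [Bool.eq_iff_iff, numeroInvalido_eq_true_iff, numeroInvalido_alt_true_iff]
  constructor
  · rintro ⟨v, hv, hlt⟩
    refine window_of_count (numeros ++ divisor) (max rep 0).toNat v hv ?_
    have h1 : 1 ≤ (numeros ++ divisor).count v := List.one_le_count_iff.mpr hv
    omega
  · rintro ⟨j, hj, heq⟩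
    obtain ⟨v, hv, hc⟩ := count_of_window (numeros ++ divisor) (max rep 0).toNat j hj heq
    exact ⟨v, hv, by omega⟩
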